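-- pv_equiv track=rewrite | github.com/Artessay/HeroSQL | src/generator/sql_generator.py | remove_sql_comments
-- ===== SOURCE A (Python) =====
-- def remove_sql_comments(sql):
--     """
--     Remove all SQL comments (both inline and full-line) from a SQL string.
--
--     Args:
--         sql (str): Input SQL string potentially containing comments.
--
--     Returns:
--         str: SQL string with all comments removed while preserving string literals.
--
--     Handles:
--     - Both single (') and double (") quoted strings
--     - Escaped quotes within strings (e.g. 'It''s valid')
--     - Comments appearing anywhere in the SQL
--     - Preservation of newlines (to be replaced later)
--     """
--     result = []
--     in_string = None  # Track string state: None, 'single', or 'double'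
--     i = 0
--     n = len(sql)
--
--     while i < n:
--         char = sql[i]
--
--         if in_string:
--             # Handle quoted string content
--             if (in_string == 'single' and char == "'") or (in_string == 'double' and char == '"'):
--                 # Check for escaped quote (SQL-standard '' or "")
--                 if i + 1 < n and sql[i+1] == char:
--                     result.extend([char, char])
--                     i += 2  # Skip escaped quote
--                 else:
--                     in_string = None
--                     result.append(char)
--                     i += 1
--             else:
--                 result.append(char)
--                 i += 1
--         else:
--             # Handle comment detection
--             if char == '-' and i + 1 < n and sql[i+1] == '-':
--                 # Skip all characters until end of line
--                 while i < n and sql[i] not in ('\n', '\r'):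
--                     i += 1
--             elif char in ("'", '"'):
--                 in_string = 'single' if char == "'" else 'double'
--                 result.append(char)
--                 i += 1
--             else:
--                 result.append(char)
--                 i += 1
--
--     return ''.join(result)
-- ===== SOURCE B (Python) =====
-- def remove_sql_comments(sql):
--     """Token-jumping rewrite: consume whole string literals, comments and
--     plain-text chunks per step instead of a char-by-char state machine."""
--     out = []
--     i = 0
--     n = len(sql)
--     while i < n:
--         c = sql[i]
--         if c == "'" or c == '"':
--             # consume the whole quoted literal (doubled quotes stay inside)
--             j = i + 1
--             while j < n:
--                 if sql[j] == c:
--                     if j + 1 < n and sql[j + 1] == c: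
--                         j += 2
--                     else:
--                         j += 1
--                         break
--                 else:
--                     j += 1
--             out.append(sql[i:j])
--             i = j
--         elif c == '-' and sql.startswith('--', i):
--             # drop everything up to the end of the line
--             while i < n and sql[i] not in '\n\r':
--                 i += 1
--         else:
--             # copy a plain chunk up to the next quote or dash
--             j = i + 1
--             while j < n and sql[j] not in '\'"-':
--                 j += 1
--             out.append(sql[i:j])
--             i = j
--     return ''.join(out)
-- ===== Notes on version B (the rewrite author's own statement) =====
-- stated objective: faster
-- what changed: Replaced A's character-by-character loop with an in_string state flag by a token-jumping scanner that consumes one whole token per step (a complete quoted literal, a whole --comment, or a plain-text chunk up to the next quote/dash) and appends slices instead of single characters.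
import Mathlib
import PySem

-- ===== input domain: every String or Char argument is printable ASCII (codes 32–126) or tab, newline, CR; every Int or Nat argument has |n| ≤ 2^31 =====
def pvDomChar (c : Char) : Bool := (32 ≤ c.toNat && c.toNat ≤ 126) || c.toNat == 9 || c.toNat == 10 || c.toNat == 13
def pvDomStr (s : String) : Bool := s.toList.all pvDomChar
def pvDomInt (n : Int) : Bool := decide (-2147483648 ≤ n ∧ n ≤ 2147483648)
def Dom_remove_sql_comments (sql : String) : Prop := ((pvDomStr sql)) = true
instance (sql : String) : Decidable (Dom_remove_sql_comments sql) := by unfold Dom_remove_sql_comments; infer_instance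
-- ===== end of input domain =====

-- B replaces A's char-by-char state-flag loop by a token-jumping scanner that
-- consumes a whole string literal / comment / plain chunk per step, appending slices (objective: faster, constant-factor: batched slice appends instead of per-char work).

-- ===== PORT A =====
-- A's "skip all characters until end of line" inner while loop
def pvSkipA (l : List Char) : List Char := l.dropWhile (fun ch => ch ≠ '\n' && ch ≠ '\r')

theorem pvSkipA_len (rest : List Char) : (pvSkipA ('-' :: rest)).length < rest.length + 1 := by
  have h1 : pvSkipA ('-' :: rest) = List.dropWhile (fun ch => ch ≠ '\n' && ch ≠ '\r') rest := by
    unfold pvSkipA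
    rw [List.dropWhile_cons_of_pos (by decide)]
  rw [h1]
  exact Nat.lt_succ_of_le (List.length_dropWhile_le _ rest)

-- A's main while loop; the in_string flag 'single'/'double' is carried as the quote char.
def pvLoopA : Option Char → List Char → List Char
  | _, [] => []
  | some q, c :: rest =>
      if c = q then
        match rest with
        | c2 :: rest2 =>
            if c2 = q then c :: c :: pvLoopA (some q) rest2   -- escaped quote, skip both
            else c :: pvLoopA none (c2 :: rest2)               -- string closes
        | [] => c :: pvLoopA none []
      else c :: pvLoopA (some q) rest
  | none, c :: rest =>
      if h : c = '-' ∧ rest.head? = some '-' then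
        pvLoopA none (pvSkipA (c :: rest))                     -- comment: skip to end of line
      else if c = '\'' ∨ c = '"' then
        c :: pvLoopA (some c) rest                             -- enter string
      else
        c :: pvLoopA none rest
  termination_by _ l => l.length
  decreasing_by
    all_goals simp
    all_goals first
      | omega
      | (rw [h.1]; exact Nat.lt_succ_iff.mp (pvSkipA_len rest))

def remove_sql_comments (sql : String) : String := String.ofList (pvLoopA none sql.toList)

-- ===== PORT B =====
-- consume a whole quoted literal after its opening quote q; returns (token, rest after it)
def pvStrTok (q : Char) : List Char → List Char × List Char
  | [] => ([], [])
  | c :: rest =>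
      if c = q then
        match rest with
        | c2 :: rest2 =>
            if c2 = q then
              (q :: q :: (pvStrTok q rest2).1, (pvStrTok q rest2).2)
            else ([q], rest)
        | [] => ([q], [])
      else
        (c :: (pvStrTok q rest).1, (pvStrTok q rest).2)
  termination_by l => l.length

-- needed by pvLoopB's termination (B recurses on the leftover suffix)
theorem pvStrTok_len (q : Char) (l : List Char) : (pvStrTok q l).2.length ≤ l.length := by
  fun_induction pvStrTok q l <;> simp_all <;> omega

-- B's comment skip: jump to the first '\n'/'\r'
def pvSkipB (l : List Char) : List Char := l.dropWhile (fun ch => ch ≠ '\n' && ch ≠ '\r')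

-- B's plain-chunk scan: text up to the next quote or dash
def pvChunk (l : List Char) : List Char × List Char :=
  l.span (fun ch => ch ≠ '\'' && ch ≠ '"' && ch ≠ '-')

theorem pvSkipB_len (rest : List Char) : (pvSkipB ('-' :: rest)).length < rest.length + 1 := by
  have h1 : pvSkipB ('-' :: rest) = List.dropWhile (fun ch => ch ≠ '\n' && ch ≠ '\r') rest := by
    unfold pvSkipB
    rw [List.dropWhile_cons_of_pos (by decide)]
  rw [h1]
  exact Nat.lt_succ_of_le (List.length_dropWhile_le _ rest)

theorem pvChunk_len (rest : List Char) : (pvChunk rest).2.length ≤ rest.length := by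
  have : (pvChunk rest).2 = rest.dropWhile (fun ch => ch ≠ '\'' && ch ≠ '"' && ch ≠ '-') := by
    simp [pvChunk, List.span_eq_takeWhile_dropWhile]
  rw [this]
  exact List.length_dropWhile_le _ rest

-- B's main loop: one whole token per step
def pvLoopB : List Char → List Char
  | [] => []
  | c :: rest =>
      if c = '\'' ∨ c = '"' then
        c :: (pvStrTok c rest).1 ++ pvLoopB (pvStrTok c rest).2
      else if h : c = '-' ∧ rest.head? = some '-' then
        pvLoopB (pvSkipB (c :: rest))
      else
        c :: (pvChunk rest).1 ++ pvLoopB (pvChunk rest).2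
  termination_by l => l.length
  decreasing_by
    all_goals simp_all
    all_goals first
      | (have := pvStrTok_len c rest; omega)
      | (have := pvSkipB_len rest; omega)
      | (have := pvChunk_len rest; omega)

def remove_sql_comments_alt (sql : String) : String := String.ofList (pvLoopB sql.toList)

-- ===== PRECONDITION & SPEC =====
def Spec_remove_sql_comments (sql : String) (out : String) : Prop := out = remove_sql_comments_alt sql
instance (sql : String) (out : String) : Decidable (Spec_remove_sql_comments sql out) := by unfold Spec_remove_sql_comments; infer_instance

-- ===== CLAIM (what is proved, stated in full; the proofs are below) =====
def Claim_equal_remove_sql_comments : Prop := ∀ (sql : String), Dom_remove_sql_comments sql → Spec_remove_sql_comments sql (remove_sql_comments sql)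

-- ===== LEMMAS AND PROOFS =====

-- A inside a string equals B's whole-literal token followed by A resumed after it
theorem pvString_resume (q : Char) (l : List Char) :
    pvLoopA (some q) l = (pvStrTok q l).1 ++ pvLoopA none (pvStrTok q l).2 := by
  fun_induction pvStrTok q l <;> simp_all [pvLoopA]
  all_goals (rename_i c rest h ih
             conv_lhs => rw [pvLoopA.eq_def]
             simp [h, ih])

-- A copies a plain chunk (no quotes, no dashes) verbatim
theorem pvChunk_pass (chunk r : List Char)
    (h : ∀ c ∈ chunk, c ≠ '\'' ∧ c ≠ '"' ∧ c ≠ '-') :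
    pvLoopA none (chunk ++ r) = chunk ++ pvLoopA none r := by
  induction chunk with
  | nil => simp
  | cons c cs ih =>
      have hc := h c (by simp)
      have h1 : pvLoopA none (c :: (cs ++ r)) = c :: pvLoopA none (cs ++ r) := by
        simp [pvLoopA, hc.1, hc.2.1, hc.2.2]
      simp only [List.cons_append, h1, ih (fun x hx => h x (by simp [hx])), List.cons_append]

-- main list-level equivalence (fuel = a length bound, for the strong induction)
theorem pvLoop_eq_aux : ∀ (n : ℕ) (l : List Char), l.length ≤ n → pvLoopA none l = pvLoopB l := by
  intro n
  induction n with
  | zero =>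
      intro l hl
      have : l = [] := List.length_eq_zero_iff.mp (Nat.le_zero.mp hl)
      subst this
      simp [pvLoopA, pvLoopB]
  | succ n ih =>
      intro l hl
      match l with
      | [] => simp [pvLoopA, pvLoopB]
      | c :: rest =>
        have hrn : rest.length ≤ n := by simp at hl; omega
        by_cases hq : c = '\'' ∨ c = '"'
        · have hnd : ¬ (c = '-' ∧ rest.head? = some '-') := by
            rintro ⟨rfl, -⟩; rcases hq with h | h <;> simp_all
          have hA : pvLoopA none (c :: rest) = c :: pvLoopA (some c) rest := by
            simp [pvLoopA, hq, hnd]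
          have hB : pvLoopB (c :: rest)
              = c :: (pvStrTok c rest).1 ++ pvLoopB (pvStrTok c rest).2 := by
            simp [pvLoopB, hq]
          rw [hA, hB, pvString_resume]
          have := ih (pvStrTok c rest).2 (le_trans (pvStrTok_len c rest) hrn)
          simp [this]
        · by_cases hd : c = '-' ∧ rest.head? = some '-'
          · have hA : pvLoopA none (c :: rest) = pvLoopA none (pvSkipA (c :: rest)) := by
              simp [pvLoopA, hd]
            have hB : pvLoopB (c :: rest) = pvLoopB (pvSkipB (c :: rest)) := by
              simp [pvLoopB, hd]
            have hlen : (pvSkipA (c :: rest)).length ≤ n := by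
              have := pvSkipA_len rest
              rw [hd.1]; omega
            rw [hA, hB]
            have := ih (pvSkipA (c :: rest)) hlen
            simpa [pvSkipA, pvSkipB] using this
          · have hq1 : c ≠ '\'' := fun h => hq (Or.inl h)
            have hq2 : c ≠ '"' := fun h => hq (Or.inr h)
            have hA : pvLoopA none (c :: rest) = c :: pvLoopA none rest := by
              simp [pvLoopA, hd, hq1, hq2]
            have hB : pvLoopB (c :: rest)
                = c :: (pvChunk rest).1 ++ pvLoopB (pvChunk rest).2 := by
              simp [pvLoopB, hq, hd]
            have hsplit : rest = (pvChunk rest).1 ++ (pvChunk rest).2 := by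
              simp [pvChunk, List.span_eq_takeWhile_dropWhile]
            have hmem : ∀ x ∈ (pvChunk rest).1, x ≠ '\'' ∧ x ≠ '"' ∧ x ≠ '-' := by
              intro x hx
              have := List.mem_takeWhile_imp
                (by simpa [pvChunk, List.span_eq_takeWhile_dropWhile] using hx)
              simp at this; tauto
            rw [hA, hB]
            conv_lhs => rw [hsplit]
            rw [pvChunk_pass _ _ hmem,
                ih (pvChunk rest).2 (le_trans (pvChunk_len rest) hrn)]
            simp

theorem pvLoop_eq (l : List Char) : pvLoopA none l = pvLoopB l :=
  pvLoop_eq_aux l.length l le_rfl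

-- ===== VERDICT (by name: the statement is the Claim_ definition above) =====
theorem remove_sql_comments_spec : Claim_equal_remove_sql_comments := by
  intro sql _
  unfold Spec_remove_sql_comments remove_sql_comments remove_sql_comments_alt
  rw [pvLoop_eq]
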